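-- pv_equiv track=rewrite | github.com/q-horton/advent-of-code | 2025/Day 12/code.py | parse
-- ===== SOURCE A (Python) =====
-- def parse(lines):
--     presents = []
--     trees = []
--     shapes_mode = True
--     next_shape = []
--     for line in lines:
--         line = line.strip()
--         if shapes_mode:
--             if len(line) == 0:
--                 presents.append(tuple(next_shape))
--             elif line[-1] == ':':
--                 next_shape = []
--             elif '0' <= line[0] <= '9':
--                 shapes_mode = False
--             else:
--                 next_row = 0
--                 for i in range(len(line)):
--                     if line[i] == '#':
--                         next_row |= (1 << i)
--                 next_shape.append(next_row)
--         if not shapes_mode: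
--             breakdown = line.split(':')
--             dims = tuple([int(i) for i in breakdown[0].split('x')])
--             quants = tuple([int(i) for i in breakdown[1].split()])
--             trees.append((dims, quants))
--     return (tuple(presents), trees)
-- ===== SOURCE B (Python) =====
-- def parse(lines):
--     stripped = [line.strip() for line in lines]
--
--     def is_tree_start(s):
--         return len(s) > 0 and s[-1] != ':' and '0' <= s[0] <= '9'
--
--     boundary = next((k for k, s in enumerate(stripped) if is_tree_start(s)),
--                     len(stripped))
--
--     presents = []
--     current = []
--     for s in stripped[:boundary]:
--         if len(s) == 0:
--             presents.append(tuple(current))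
--         elif s[-1] == ':':
--             current = []
--         else:
--             row = 0
--             for i in range(len(s)):
--                 if s[i] == '#':
--                     row |= (1 << i)
--             current.append(row)
--
--     trees = []
--     for s in stripped[boundary:]:
--         parts = s.split(':')
--         dims = tuple([int(i) for i in parts[0].split('x')])
--         quants = tuple([int(i) for i in parts[1].split()])
--         trees.append((dims, quants))
--
--     return (tuple(presents), trees)
-- ===== Notes on version B (the rewrite author's own statement) =====
-- stated objective: alternative
-- what changed: Replaces the single pass with a mode flag by first locating the shapes/trees boundary (first stripped line with a digit first char, not ending in ':'), then parsing the two slices with two dedicated loops without any mode state.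
import Mathlib
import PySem

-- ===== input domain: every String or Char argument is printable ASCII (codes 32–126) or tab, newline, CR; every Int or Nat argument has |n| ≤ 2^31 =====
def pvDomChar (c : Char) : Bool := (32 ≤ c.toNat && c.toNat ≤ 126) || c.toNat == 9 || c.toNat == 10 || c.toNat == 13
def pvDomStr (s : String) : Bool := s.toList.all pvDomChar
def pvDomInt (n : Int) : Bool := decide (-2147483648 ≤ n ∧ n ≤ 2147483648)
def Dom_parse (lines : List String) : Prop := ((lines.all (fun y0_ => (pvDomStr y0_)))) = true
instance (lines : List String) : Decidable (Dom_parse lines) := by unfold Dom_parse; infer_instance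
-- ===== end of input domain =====

-- B re-decomposes A's one-pass mode-flag parser into a boundary search plus two dedicated slice
-- loops (same cost, different structure); the row/tree-line sub-parsers are identical in both Pythons.

-- ===== PORT A =====

-- next_row |= (1 << i) for each '#' at index i (exact: range(len(line)) over the char list)
def pvPackRow (cs : List Char) : Int :=
  (List.range cs.length).foldl
    (fun r i => if cs.getD i ' ' = '#' then PySem.Int.bor r ((1 : Int) <<< i) else r) 0

-- breakdown = line.split(':'); int() raising = ofChars? none, excluded by Pre_, so getD 0 is unreachable there
def pvTreeLine (t : List Char) : List Int × List Int :=
  let breakdown := PySem.Chars.splitOn t [':']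
  let dims := (PySem.Chars.splitOn (breakdown.getD 0 []) ['x']).map
      (fun u => (PySem.Int.ofChars? u).getD 0)
  let quants := (PySem.Chars.split₀ (breakdown.getD 1 [])).map
      (fun u => (PySem.Int.ofChars? u).getD 0)
  (dims, quants)

-- one iteration of A's loop on a stripped line; state: (presents, trees, shapes_mode, next_shape)
def pvAStep (st : List (List Int) × List (List Int × List Int) × Bool × List Int)
    (t : List Char) : List (List Int) × List (List Int × List Int) × Bool × List Int :=
  let p := st.1; let tr := st.2.1; let m := st.2.2.1; let ns := st.2.2.2
  let s1 :=
    if m then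
      if t = [] then (p ++ [ns], m, ns)
      else if t.getLast?.getD ' ' = ':' then (p, m, ([] : List Int))
      else if '0' ≤ t.head?.getD ' ' ∧ t.head?.getD ' ' ≤ '9' then (p, false, ns)
      else (p, m, ns ++ [pvPackRow t])
    else (p, m, ns)
  if s1.2.1 then (s1.1, tr, s1.2.1, s1.2.2)
  else (s1.1, tr ++ [pvTreeLine t], s1.2.1, s1.2.2)

def parse (lines : List String) : List (List Int) × (List (List Int × List Int)) :=
  let st := lines.foldl (fun st line => pvAStep st (PySem.Chars.strip line.toList))
      ([], [], true, [])
  (st.1, st.2.1)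

-- ===== PORT B =====

def pvIsTreeStart (t : List Char) : Bool :=
  decide (0 < t.length) && (t.getLast?.getD ' ' != ':') &&
    (decide ('0' ≤ t.head?.getD ' ') && decide (t.head?.getD ' ' ≤ '9'))

-- one iteration of B's shapes loop; state: (presents, current)
def pvBShapeStep (st : List (List Int) × List Int) (t : List Char) :
    List (List Int) × List Int :=
  if t = [] then (st.1 ++ [st.2], st.2)
  else if t.getLast?.getD ' ' = ':' then (st.1, [])
  else (st.1, st.2 ++ [pvPackRow t])

def parse_alt (lines : List String) : List (List Int) × (List (List Int × List Int)) :=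
  let stripped := lines.map (fun line => PySem.Chars.strip line.toList)
  let boundary := stripped.findIdx pvIsTreeStart
  let sh := (stripped.take boundary).foldl pvBShapeStep ([], [])
  (sh.1, (stripped.drop boundary).map pvTreeLine)

-- ===== PRECONDITION & SPEC =====
-- Pre_ excludes exactly the inputs on which Python A raises: from the first tree-start line on
-- (first stripped line with a digit first char, not ending in ':'), every stripped line must
-- contain ':' (else IndexError) and its dims/quants fields must be int()-parsable (else ValueError).
def Pre_parse (lines : List String) : Prop :=
  ∀ t ∈ ((lines.map (fun line => PySem.Chars.strip line.toList)).drop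
      ((lines.map (fun line => PySem.Chars.strip line.toList)).findIdx pvIsTreeStart)),
    2 ≤ (PySem.Chars.splitOn t [':']).length ∧
    (∀ u ∈ PySem.Chars.splitOn ((PySem.Chars.splitOn t [':']).getD 0 []) ['x'],
        (PySem.Int.ofChars? u).isSome) ∧
    (∀ u ∈ PySem.Chars.split₀ ((PySem.Chars.splitOn t [':']).getD 1 []),
        (PySem.Int.ofChars? u).isSome)
instance (lines : List String) : Decidable (Pre_parse lines) := by
  unfold Pre_parse; infer_instance

def pvWitness_parse : List String := ["0:", "#.", ".#", "", "1x2: 3 4", "5x6: 7"]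

def Spec_parse (lines : List String) (out : List (List Int) × (List (List Int × List Int))) : Prop := out = parse_alt lines
instance (lines : List String) (out : List (List Int) × (List (List Int × List Int))) : Decidable (Spec_parse lines out) := by unfold Spec_parse; infer_instance

-- ===== CLAIM (what is proved, stated in full; the proofs are below) =====
def Claim_equal_parse : Prop := ∀ (lines : List String), Dom_parse lines → Pre_parse lines → Spec_parse lines (parse lines)

-- ===== LEMMAS AND PROOFS =====

-- once shapes_mode is false, A's loop only appends one tree line per input line
theorem pvAStep_false (ts : List (List Char)) (p : List (List Int))
    (tr : List (List Int × List Int)) (ns : List Int) :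
    ts.foldl pvAStep (p, tr, false, ns) = (p, tr ++ ts.map pvTreeLine, false, ns) := by
  induction ts generalizing tr with
  | nil => simp
  | cons t ts ih =>
    simp only [List.foldl_cons, List.map_cons]
    rw [show pvAStep (p, tr, false, ns) t = (p, tr ++ [pvTreeLine t], false, ns) by
      simp [pvAStep]]
    rw [ih]; simp

-- A's fold in shapes mode = B's split at the boundary (for the two returned components)
theorem pvMain (ts : List (List Char)) (p : List (List Int))
    (tr : List (List Int × List Int)) (ns : List Int) :
    ts.foldl pvAStep (p, tr, true, ns) =
      (((ts.take (ts.findIdx pvIsTreeStart)).foldl pvBShapeStep (p, ns)).1,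
       tr ++ (ts.drop (ts.findIdx pvIsTreeStart)).map pvTreeLine,
       (ts.foldl pvAStep (p, tr, true, ns)).2.2.1,
       (ts.foldl pvAStep (p, tr, true, ns)).2.2.2) := by
  induction ts generalizing p tr ns with
  | nil => simp
  | cons t ts ih =>
    by_cases hb' : pvIsTreeStart t = true
    · have hb := hb'
      have ht : t ≠ [] := by
        intro h; subst h; simp [pvIsTreeStart] at hb
      simp only [pvIsTreeStart, Bool.and_eq_true, bne_iff_ne, decide_eq_true_eq] at hb
      have hstep : pvAStep (p, tr, true, ns) t = (p, tr ++ [pvTreeLine t], false, ns) := by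
        simp [pvAStep, ht, hb.1.2, hb.2.1, hb.2.2]
      simp only [List.findIdx_cons, hb', cond_true, List.take_zero, List.drop_zero,
        List.foldl_nil, List.foldl_cons, hstep, pvAStep_false, List.map_cons]
      simp
    · have hb : pvIsTreeStart t = false := by simpa using hb'
      have hstep : pvAStep (p, tr, true, ns) t =
          ((pvBShapeStep (p, ns) t).1, tr, true, (pvBShapeStep (p, ns) t).2) := by
        by_cases ht : t = []
        · simp [pvAStep, pvBShapeStep, ht]
        · by_cases hlast : t.getLast?.getD ' ' = ':'
          · simp [pvAStep, pvBShapeStep, ht, hlast]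
          · have hnd : ¬ ('0' ≤ t.head?.getD ' ' ∧ t.head?.getD ' ' ≤ '9') := by
              intro hd
              apply hb'
              simp [pvIsTreeStart, hlast, hd.1, hd.2, List.length_pos_iff, ht]
            simp [pvAStep, pvBShapeStep, ht, hlast, hnd]
      simp only [List.findIdx_cons, hb, cond_false, List.foldl_cons, hstep,
        List.take_succ_cons, List.drop_succ_cons]
      exact ih (pvBShapeStep (p, ns) t).1 tr (pvBShapeStep (p, ns) t).2

-- ===== VERDICT (by name: the statement is the Claim_ definition above) =====
theorem parse_spec : Claim_equal_parse := by
  intro lines _ _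
  show parse lines = parse_alt lines
  simp only [parse, parse_alt]
  have hmap : List.foldl (fun st line => pvAStep st (PySem.Chars.strip line.toList))
      ([], [], true, []) lines =
      List.foldl pvAStep ([], [], true, [])
        (lines.map fun line => PySem.Chars.strip line.toList) :=
    List.foldl_map.symm
  rw [hmap, pvMain]
  simp
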